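-- pv_equiv track=rewrite | github.com/senseuwaterloo/PILARData_ICSE2023 | SourceCode/Parser.py | TemplateGeneratorTest
-- ===== SOURCE A (Python) =====
-- def TemplateGeneratorTest(tokens, dynamic_index):
--     dValue = 0
--     sValue = 0
--
--     index = 0
--     for token in tokens:
--         if index in dynamic_index:
--             dValue = dValue+1
--         else:
--             sValue = sValue+1
--         index = index + 1
--     return dValue, sValue
-- ===== SOURCE B (Python) =====
-- def TemplateGeneratorTest(tokens, dynamic_index):
--     n = len(tokens)
--     dValue = len(set(dynamic_index).intersection(range(n)))
--     return dValue, n - dValue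
-- ===== Notes on version B (the rewrite author's own statement) =====
-- stated objective: alternative
-- what changed: B intersects the deduplicated dynamic_index with range(len(tokens)) to count dynamic positions and derives the static count arithmetically as n - dValue, instead of A's per-token loop that tests each index for membership in dynamic_index.
import Mathlib
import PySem

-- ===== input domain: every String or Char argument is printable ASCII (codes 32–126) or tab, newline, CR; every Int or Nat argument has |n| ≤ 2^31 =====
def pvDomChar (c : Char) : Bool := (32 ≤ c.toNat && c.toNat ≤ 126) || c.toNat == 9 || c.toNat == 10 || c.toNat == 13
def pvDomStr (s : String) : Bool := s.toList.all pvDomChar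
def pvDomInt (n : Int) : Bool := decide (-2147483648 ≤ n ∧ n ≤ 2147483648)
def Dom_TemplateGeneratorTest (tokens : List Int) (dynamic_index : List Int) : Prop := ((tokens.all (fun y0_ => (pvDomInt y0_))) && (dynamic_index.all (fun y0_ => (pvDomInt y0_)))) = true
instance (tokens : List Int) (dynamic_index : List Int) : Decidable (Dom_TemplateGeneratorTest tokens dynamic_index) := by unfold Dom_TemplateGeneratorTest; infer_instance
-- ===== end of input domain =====

-- B intersects the distinct dynamic indices with range(len(tokens)) and derives the static count
-- as n - dValue, replacing A's per-token loop with a membership scan inside (alternative).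

-- ===== PORT A =====
-- state = (dValue, sValue, index), exactly A's loop over tokens
def TemplateGeneratorTest (tokens : List Int) (dynamic_index : List Int) : Int × Int :=
  let r := tokens.foldl
    (fun (st : Int × Int × Int) _token =>
      if dynamic_index.contains st.2.2 then (st.1 + 1, st.2.1, st.2.2 + 1)
      else (st.1, st.2.1 + 1, st.2.2 + 1))
    (0, 0, 0)
  (r.1, r.2.1)

-- ===== PORT B =====
-- n = len(tokens); dValue = len(set(dynamic_index).intersection(range(n))); return dValue, n - dValue
def TemplateGeneratorTest_alt (tokens : List Int) (dynamic_index : List Int) : Int × Int :=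
  let n : Int := tokens.length
  let dValue : Int :=
    (PySem.Set.inter (PySem.Set.ofList dynamic_index) (PySem.List.pyRange 0 n 1)).length
  (dValue, n - dValue)

-- ===== PRECONDITION & SPEC =====
def Spec_TemplateGeneratorTest (tokens : List Int) (dynamic_index : List Int) (out : Int × Int) : Prop := out = TemplateGeneratorTest_alt tokens dynamic_index
instance (tokens : List Int) (dynamic_index : List Int) (out : Int × Int) : Decidable (Spec_TemplateGeneratorTest tokens dynamic_index out) := by unfold Spec_TemplateGeneratorTest; infer_instance

-- ===== CLAIM (what is proved, stated in full; the proofs are below) =====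
def Claim_equal_TemplateGeneratorTest : Prop := ∀ (tokens : List Int) (dynamic_index : List Int), Dom_TemplateGeneratorTest tokens dynamic_index → Spec_TemplateGeneratorTest tokens dynamic_index (TemplateGeneratorTest tokens dynamic_index)

-- ===== LEMMAS AND PROOFS =====

def rangeInt (n : Nat) : List Int := (List.range n).map (fun (k : Nat) => (k : Int))

-- A's fold characterised: starting at index i, it counts how many of i, i+1, …, i+len-1 are in di
theorem foldA_eq (di : List Int) (tokens : List Int) (d s i : Int) :
    tokens.foldl
      (fun (st : Int × Int × Int) _token =>
        if di.contains st.2.2 then (st.1 + 1, st.2.1, st.2.2 + 1)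
        else (st.1, st.2.1 + 1, st.2.2 + 1))
      (d, s, i)
      = (d + ((List.range tokens.length).countP (fun (k : Nat) => di.contains (i + (k : Int))) : Nat),
         s + ((tokens.length : Int) - ((List.range tokens.length).countP (fun (k : Nat) => di.contains (i + (k : Int))) : Nat)),
         i + tokens.length) := by
  induction tokens generalizing d s i with
  | nil => simp
  | cons t ts ih =>
    have hr : List.range (ts.length + 1) = 0 :: (List.range ts.length).map Nat.succ :=
      List.range_succ_eq_map
    have hc : (((List.range ts.length).map Nat.succ).countP (fun (k : Nat) => di.contains (i + (k : Int))))
        = (List.range ts.length).countP (fun (k : Nat) => di.contains ((i + 1) + (k : Int))) := by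
      rw [List.countP_map]
      apply List.countP_congr
      intro a _
      simp only [Function.comp_apply, Nat.succ_eq_add_one]
      push_cast
      ring_nf
    simp only [List.foldl_cons, List.length_cons, hr, List.countP_cons, hc]
    by_cases h : i ∈ di
    · rw [if_pos (by simpa using h), ih]
      refine Prod.ext ?_ (Prod.ext ?_ ?_) <;> (simp [h]; try omega)
    · rw [if_neg (by simpa using h), ih]
      refine Prod.ext ?_ (Prod.ext ?_ ?_) <;> (simp [h]; try omega)

theorem mem_rangeInt (n : Nat) (x : Int) : x ∈ rangeInt n ↔ 0 ≤ x ∧ x < n := by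
  simp only [rangeInt, List.mem_map, List.mem_range]
  constructor
  · rintro ⟨k, hk, rfl⟩
    constructor <;> omega
  · rintro ⟨h0, hn⟩
    exact ⟨x.toNat, by omega, by omega⟩

theorem nodup_rangeInt (n : Nat) : (rangeInt n).Nodup := by
  refine List.nodup_range.map ?_
  intro a b h
  simpa using h

-- the two counts agree: counting range indices lying in di = the size of set(di) ∩ range(n)
theorem counts_agree (di : List Int) (n : Nat) :
    (List.range n).countP (fun (k : Nat) => di.contains ((0 : Int) + (k : Int)))
      = (PySem.Set.inter (PySem.Set.ofList di) (PySem.List.pyRange 0 (n : Int) 1)).length := by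
  have h1 : (List.range n).countP (fun (k : Nat) => di.contains ((0 : Int) + (k : Int)))
      = (rangeInt n).countP (fun x => di.contains x) := by
    rw [rangeInt, List.countP_map]
    apply List.countP_congr
    intro a _
    simp
  rw [h1, List.countP_eq_length_filter]
  apply List.Perm.length_eq
  rw [List.perm_ext_iff_of_nodup
        ((nodup_rangeInt n).filter _)
        (PySem.Set.nodup_inter _ _ (PySem.Set.nodup_ofList di))]
  intro x
  simp only [List.mem_filter, mem_rangeInt, PySem.Set.mem_inter, PySem.Set.mem_ofList,
    PySem.List.mem_pyRange_one, List.contains_iff_mem]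
  tauto

-- ===== VERDICT (by name: the statement is the Claim_ definition above) =====
theorem TemplateGeneratorTest_spec : Claim_equal_TemplateGeneratorTest := by
  intro tokens di _
  unfold Spec_TemplateGeneratorTest TemplateGeneratorTest TemplateGeneratorTest_alt
  dsimp only
  rw [foldA_eq, counts_agree]
  simp
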